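-- pv_equiv track=rewrite | github.com/cthulahoops/aoc | 2021/day8.py | compute_signatures
-- ===== SOURCE A (Python) =====
-- def compute_signatures(digits):
--     signatures = {}
--     for wire in "abcdefg":
--         signature = [0] * 8
--         for digit in digits:
--             if wire in digit:
--                 signature[len(digit)] += 1
--         signatures[wire] = ''.join(str(s) for s in signature)
--     return signatures
-- ===== SOURCE B (Python) =====
-- def compute_signatures(digits):
--     # One accumulation pass: count (wire, length) pairs in a single dict,
--     # then read the 7x8 table out of it.
--     counts = {}
--     for digit in digits:
--         for wire in set(digit):
--             if wire in "abcdefg":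
--                 key = (wire, len(digit))
--                 counts[key] = counts.get(key, 0) + 1
--     return {wire: ''.join(str(counts.get((wire, l), 0)) for l in range(8))
--             for wire in "abcdefg"}
-- ===== Notes on version B (the rewrite author's own statement) =====
-- stated objective: alternative
-- what changed: Replaces A's seven full scans of the digit list (one per wire, each maintaining a length histogram updated in place) by a single accumulation pass that counts (wire, length) pairs in one dict, from which the whole 7x8 table is then read out.
import Mathlib
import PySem

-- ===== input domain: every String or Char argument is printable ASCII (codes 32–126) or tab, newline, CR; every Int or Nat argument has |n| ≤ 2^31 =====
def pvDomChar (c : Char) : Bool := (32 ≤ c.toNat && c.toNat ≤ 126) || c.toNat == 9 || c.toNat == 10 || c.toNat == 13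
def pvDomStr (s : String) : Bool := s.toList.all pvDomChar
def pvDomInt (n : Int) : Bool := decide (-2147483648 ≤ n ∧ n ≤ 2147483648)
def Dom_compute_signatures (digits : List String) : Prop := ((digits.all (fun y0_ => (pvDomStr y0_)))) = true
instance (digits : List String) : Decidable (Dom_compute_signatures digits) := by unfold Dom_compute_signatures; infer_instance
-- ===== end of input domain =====

-- B replaces A's seven scans of the digit list (one per wire, each maintaining a length
-- histogram updated in place) by one accumulation pass counting (wire, length) pairs in a
-- dict, from which the table is then read out; objective: alternative decomposition.

-- ===== PORT A =====
-- body of A's inner loop; `List.set` is a no-op where Python's `signature[len(digit)] += 1`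
-- raises IndexError (len(digit) ≥ 8 with the wire present) — those inputs are excluded by Pre_.
def aStep (wire : Char) (sig : List Int) (digit : String) : List Int :=
  if digit.toList.contains wire then
    sig.set digit.toList.length (sig.getD digit.toList.length 0 + 1)
  else sig

def compute_signatures (digits : List String) : List (String × String) :=
  (("abcdefg".toList).foldl (fun sigs wire =>
    sigs.insert (String.ofList [wire])
      (PySem.Str.join "" ((digits.foldl (aStep wire) (List.replicate 8 (0 : Int))).map PySem.Int.toStr)))
    PySem.Dict.empty).items

-- ===== PORT B =====
-- body of B's inner loop: `for wire in set(digit): if wire in "abcdefg": counts[key] = counts.get(key, 0) + 1`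
def bStep (digit : String) (c : PySem.Dict (Char × Int) Int) (wire : Char) : PySem.Dict (Char × Int) Int :=
  if ("abcdefg".toList).contains wire then
    c.insert (wire, (digit.toList.length : Int)) (c.getD (wire, (digit.toList.length : Int)) 0 + 1)
  else c

def bCounts (digits : List String) : PySem.Dict (Char × Int) Int :=
  digits.foldl (fun c digit => (PySem.Set.ofList digit.toList).foldl (bStep digit) c) PySem.Dict.empty

def compute_signatures_alt (digits : List String) : List (String × String) :=
  ("abcdefg".toList).map (fun wire =>
    (String.ofList [wire],
     PySem.Str.join "" ((PySem.List.pyRange 0 8 1).map (fun l =>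
       PySem.Int.toStr ((bCounts digits).getD (wire, l) 0)))))

-- ===== PRECONDITION & SPEC =====
-- Pre_ excludes exactly the inputs on which A raises IndexError: a digit of length ≥ 8 containing one of the wires a–g.
def Pre_compute_signatures (digits : List String) : Prop :=
  ∀ d ∈ digits, 8 ≤ d.toList.length → ∀ c ∈ "abcdefg".toList, c ∉ d.toList
instance (digits : List String) : Decidable (Pre_compute_signatures digits) := by
  unfold Pre_compute_signatures; infer_instance
def pvWitness_compute_signatures : List String := ["ab", "abc", ""]

def Spec_compute_signatures (digits : List String) (out : List (String × String)) : Prop := out = compute_signatures_alt digits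
instance (digits : List String) (out : List (String × String)) : Decidable (Spec_compute_signatures digits out) := by unfold Spec_compute_signatures; infer_instance

-- ===== CLAIM (what is proved, stated in full; the proofs are below) =====
def Claim_equal_compute_signatures : Prop := ∀ (digits : List String), Dom_compute_signatures digits → Pre_compute_signatures digits → Spec_compute_signatures digits (compute_signatures digits)

-- ===== LEMMAS AND PROOFS =====

-- number of digits that contain wire w and have length l
def cntW (digits : List String) (w : Char) (l : Nat) : Nat :=
  (digits.filter (fun d => d.toList.contains w && d.toList.length == l)).length

-- the list of (wire, length) keys B's inner loop inserts for one digit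
def keylist (d : String) : List (Char × Int) :=
  ((PySem.Set.ofList d.toList).filter (fun wire => ("abcdefg".toList).contains wire)).map
    (fun wire => (wire, (d.toList.length : Int)))

theorem cntW_cons (d : String) (ds : List String) (w : Char) (l : Nat) :
    cntW (d :: ds) w l =
      (if d.toList.contains w && d.toList.length == l then 1 else 0) + cntW ds w l := by
  cases h : (d.toList.contains w && d.toList.length == l) with
  | true => simp only [cntW]; rw [List.filter_cons, h]; simp [Nat.add_comm]
  | false => simp only [cntW]; rw [List.filter_cons, h]; simp

theorem aStep_length (w : Char) (sig : List Int) (d : String) :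
    (aStep w sig d).length = sig.length := by
  unfold aStep; split <;> simp

theorem aStep_getD (w : Char) (sig : List Int) (d : String) (l : Nat)
    (hlen : sig.length = 8) (_hl : l < 8)
    (hdl : d.toList.contains w = true → d.toList.length < 8) :
    (aStep w sig d).getD l 0 =
      sig.getD l 0 + (if d.toList.contains w && d.toList.length == l then 1 else 0) := by
  unfold aStep
  cases hc : d.toList.contains w with
  | false => simp
  | true =>
    have h8 : d.toList.length < 8 := hdl hc
    have key : (sig.set d.toList.length (sig.getD d.toList.length 0 + 1)).getD l 0 =
        sig.getD l 0 + (if d.toList.length == l then 1 else 0) := by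
      simp only [List.getD_eq_getElem?_getD, List.getElem?_set]
      by_cases hll : d.toList.length = l
      · rw [hll, if_pos rfl, if_pos (show l < sig.length by omega),
          if_pos (show (l == l) = true from beq_self_eq_true l)]
        rfl
      · rw [if_neg hll, if_neg (show ¬ (d.toList.length == l) = true by simpa using hll)]
        omega
    simpa using key

theorem foldA_length (w : Char) (digits : List String) (sig : List Int) :
    (digits.foldl (aStep w) sig).length = sig.length := by
  induction digits generalizing sig with
  | nil => rfl
  | cons d ds ih => rw [List.foldl_cons, ih, aStep_length]

theorem foldA_getD (w : Char) (digits : List String) (sig : List Int)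
    (hlen : sig.length = 8)
    (hpre : ∀ d ∈ digits, d.toList.contains w = true → d.toList.length < 8)
    (l : Nat) (hl : l < 8) :
    (digits.foldl (aStep w) sig).getD l 0 = sig.getD l 0 + (cntW digits w l : Int) := by
  induction digits generalizing sig with
  | nil => simp [cntW]
  | cons d ds ih =>
    rw [List.foldl_cons,
      ih _ (by rw [aStep_length]; exact hlen) (fun x hx => hpre x (by simp [hx])),
      aStep_getD w sig d l hlen hl (hpre d (by simp)), cntW_cons]
    split <;> push_cast <;> ring

theorem sigA_eq (w : Char) (digits : List String)
    (hpre : ∀ d ∈ digits, d.toList.contains w = true → d.toList.length < 8) :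
    digits.foldl (aStep w) (List.replicate 8 (0 : Int)) =
      (List.range 8).map (fun l => (cntW digits w l : Int)) := by
  apply List.ext_getElem (by simp [foldA_length])
  intro i h1 h2
  have hi : i < 8 := by simpa [foldA_length] using h1
  have hfold := foldA_getD w digits (List.replicate 8 (0 : Int)) (by simp) hpre i hi
  rw [List.getD_eq_getElem (hn := h1), List.getD_replicate _ hi, zero_add] at hfold
  rw [hfold]
  simp

-- B's inner loop over one digit, as a key-count
theorem innerB_getD (d : String) (c : PySem.Dict (Char × Int) Int) (k : Char × Int) :
    ((PySem.Set.ofList d.toList).foldl (bStep d) c).getD k 0 =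
      c.getD k 0 + ((keylist d).count k : Int) := by
  unfold bStep keylist
  rw [← List.foldl_filter, ← List.foldl_map
      (g := fun (c : PySem.Dict (Char × Int) Int) (x : Char × Int) => c.insert x (c.getD x 0 + 1)),
    PySem.Dict.getD_foldl_insert_add_one]

theorem foldB_getD (digits : List String) (c : PySem.Dict (Char × Int) Int) (k : Char × Int) :
    (digits.foldl (fun c digit => (PySem.Set.ofList digit.toList).foldl (bStep digit) c) c).getD k 0 =
      c.getD k 0 + ((digits.map (fun d => (((keylist d).count k : Nat) : Int))).sum) := by
  induction digits generalizing c with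
  | nil => simp
  | cons d ds ih =>
    rw [List.foldl_cons, ih, innerB_getD, List.map_cons, List.sum_cons]
    ring

-- per-digit key count as a membership test
theorem keycount (d : String) (w : Char) (l : Nat) (hw : w ∈ "abcdefg".toList) :
    (keylist d).count (w, (l : Int))
    = if d.toList.contains w && d.toList.length == l then 1 else 0 := by
  unfold keylist
  rw [List.count, List.countP_map]
  by_cases hll : d.toList.length = l
  · have hfun : ((fun x => x == (w, (l : Int))) ∘ (fun wire => (wire, (d.toList.length : Int))))
        = (fun wire => wire == w) := by
      funext wire; simp [hll]
    rw [hfun, ← List.count]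
    have hbl : (d.toList.length == l) = true := beq_iff_eq.mpr hll
    by_cases hm : w ∈ d.toList
    · rw [List.count_eq_one_of_mem
        (List.Nodup.filter _ (PySem.Set.nodup_ofList _))
        (List.mem_filter.2 ⟨(PySem.Set.mem_ofList _ _).2 hm, by simpa using hw⟩)]
      have hb : (d.toList.contains w) = true := by simpa using hm
      rw [hb, hbl]
      rfl
    · rw [List.count_eq_zero_of_not_mem
        (fun hmem => hm ((PySem.Set.mem_ofList _ _).1 (List.mem_filter.1 hmem).1))]
      have hb : (d.toList.contains w) = false := by simpa using hm
      rw [hb]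
      rfl
  · have hbl : (d.toList.length == l) = false := beq_eq_false_iff_ne.mpr hll
    rw [List.countP_eq_zero.2 ?side, hbl, Bool.and_false, if_neg (by simp)]
    intro x hx
    simp only [Function.comp, beq_iff_eq, Prod.mk.injEq]
    intro hcon
    exact absurd (by exact_mod_cast hcon.2) hll

theorem countsB_getD (digits : List String) (w : Char) (hw : w ∈ "abcdefg".toList) (l : Nat) :
    (bCounts digits).getD (w, (l : Int)) 0 = (cntW digits w l : Int) := by
  unfold bCounts
  rw [foldB_getD]
  simp only [PySem.Dict.getD_empty, zero_add]
  induction digits with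
  | nil => simp [cntW]
  | cons d ds ih =>
    rw [List.map_cons, List.sum_cons, ih, keycount d w l hw, cntW_cons]
    split <;> push_cast <;> ring

theorem pyRange8 : PySem.List.pyRange 0 8 1 = [0, 1, 2, 3, 4, 5, 6, 7].map (fun n => (n : Int)) := by decide

-- ===== VERDICT (by name: the statement is the Claim_ definition above) =====
theorem compute_signatures_spec : Claim_equal_compute_signatures := by
  intro digits _ hpre
  unfold Spec_compute_signatures compute_signatures compute_signatures_alt
  rw [PySem.Dict.items_foldl_insert_fresh ("abcdefg".toList)
      (fun wire => String.ofList [wire])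
      (fun wire => PySem.Str.join "" ((digits.foldl (aStep wire) (List.replicate 8 (0 : Int))).map PySem.Int.toStr))
      PySem.Dict.empty
      (by intro a _; simp) (by decide)]
  rw [show (PySem.Dict.empty : PySem.Dict String String).items = [] from rfl, List.nil_append]
  apply List.map_congr_left
  intro w hw
  have hpw : ∀ d ∈ digits, d.toList.contains w = true → d.toList.length < 8 := by
    intro d hd hc
    by_contra h8
    exact hpre d hd (by omega) w hw (by simpa using hc)
  have hc8 : ∀ l : Nat, (bCounts digits).getD (w, (l : Int)) 0 = (cntW digits w l : Int) :=
    countsB_getD digits w hw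
  have e : ∀ (l : Nat) (li : Int), li = (l : Int) →
      (bCounts digits).getD (w, li) 0 = (cntW digits w l : Int) := by
    intro l li h; rw [h]; exact hc8 l
  rw [sigA_eq w digits hpw, pyRange8,
    show List.range 8 = [0, 1, 2, 3, 4, 5, 6, 7] from rfl]
  simp only [List.map_cons, List.map_nil]
  rw [e 0 0 (by norm_num), e 1 1 (by norm_num), e 2 2 (by norm_num), e 3 3 (by norm_num),
    e 4 4 (by norm_num), e 5 5 (by norm_num), e 6 6 (by norm_num), e 7 7 (by norm_num)]
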